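-- pv_equiv track=rewrite | github.com/PierreVieira/URI | Python/Strings/2954 - O Jogo.py | tempos
-- ===== SOURCE A (Python) =====
-- def tempos(palavras):
--     lista_tempos = []
--     cont = 0
--     for palavra in palavras:
--         cont += len(palavra)
--         if palavra.lower() == 'perdi' or palavra.lower() == 'jogo':
--             lista_tempos.append(cont)
--             cont = 0
--     return lista_tempos
-- ===== SOURCE B (Python) =====
-- def tempos(palavras):
--     res = []
--     rest = palavras
--     while True:
--         i = 0
--         while i < len(rest) and rest[i].lower() not in ('perdi', 'jogo'):
--             i += 1
--         if i == len(rest):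
--             return res
--         res.append(sum(len(w) for w in rest[:i + 1]))
--         rest = rest[i + 1:]
-- ===== Notes on version B (the rewrite author's own statement) =====
-- stated objective: alternative
-- what changed: B repeatedly scans for the next keyword, sums the lengths of that whole segment (keyword included) with one sum over a slice, and continues on the remaining suffix, instead of A's single accumulate-and-reset counter loop.
import Mathlib
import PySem

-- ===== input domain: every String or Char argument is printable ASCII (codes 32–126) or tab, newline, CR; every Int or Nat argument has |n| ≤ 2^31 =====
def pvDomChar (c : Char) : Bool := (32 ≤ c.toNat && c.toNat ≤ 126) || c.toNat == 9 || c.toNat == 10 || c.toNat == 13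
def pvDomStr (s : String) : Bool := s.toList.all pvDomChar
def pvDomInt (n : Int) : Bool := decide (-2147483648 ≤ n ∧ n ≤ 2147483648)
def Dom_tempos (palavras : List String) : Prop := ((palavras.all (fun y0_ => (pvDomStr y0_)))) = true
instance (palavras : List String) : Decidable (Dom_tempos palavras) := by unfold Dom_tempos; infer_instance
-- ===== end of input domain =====

-- B scans segment-by-segment: find the next keyword, sum that whole slice, recurse on the
-- suffix — an alternative decomposition of A's accumulate-and-reset loop (same cost).


-- ===== PORT A =====
def tempos (palavras : List String) : List Int :=
  (palavras.foldl
    (fun (st : List Int × Int) palavra =>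
      let cont := st.2 + PySem.Str.len palavra
      if PySem.Str.lower palavra == "perdi" || PySem.Str.lower palavra == "jogo" then
        (st.1 ++ [cont], 0)
      else
        (st.1, cont))
    ([], 0)).1

-- ===== PORT B =====
def pvIsKw (w : String) : Bool := PySem.Str.lower w == "perdi" || PySem.Str.lower w == "jogo"

def tempos_alt (palavras : List String) : List Int :=
  -- Source B: scan to the first keyword (the inner while = takeWhile/dropWhile on not-keyword);
  -- if none, stop; else append sum(len(w) for w in rest[:i+1]) and continue with rest[i+1:].
  match h : palavras.dropWhile (fun w => !pvIsKw w) with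
  | [] => []
  | k :: rest =>
      ((palavras.takeWhile (fun w => !pvIsKw w) ++ [k]).foldl
          (fun a w => a + PySem.Str.len w) 0)
        :: tempos_alt rest
termination_by palavras.length
decreasing_by
  have h1 : (palavras.dropWhile (fun w => !pvIsKw w)).length ≤ palavras.length :=
    List.length_dropWhile_le _ _
  rw [h] at h1
  simpa using Nat.lt_of_lt_of_le (Nat.lt_succ_self _) h1

-- ===== PRECONDITION & SPEC =====
def Spec_tempos (palavras : List String) (out : List Int) : Prop := out = tempos_alt palavras
instance (palavras : List String) (out : List Int) : Decidable (Spec_tempos palavras out) := by unfold Spec_tempos; infer_instance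

-- ===== CLAIM (what is proved, stated in full; the proofs are below) =====
def Claim_equal_tempos : Prop := ∀ (palavras : List String), Dom_tempos palavras → Spec_tempos palavras (tempos palavras)

-- ===== LEMMAS AND PROOFS =====

/-- Add `c` to the first element (if any). -/
def addFirst (c : Int) : List Int → List Int
  | [] => []
  | x :: xs => (c + x) :: xs

theorem addFirst_zero (l : List Int) : addFirst 0 l = l := by
  cases l <;> simp [addFirst]

theorem addFirst_addFirst (c d : Int) (l : List Int) :
    addFirst c (addFirst d l) = addFirst (c + d) l := by
  cases l <;> simp [addFirst, add_assoc]

theorem foldl_len_shift (xs : List String) (s : Int) :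
    xs.foldl (fun a w => a + PySem.Str.len w) s = s + xs.foldl (fun a w => a + PySem.Str.len w) 0 := by
  induction xs generalizing s with
  | nil => simp
  | cons x xs ih =>
      simp only [List.foldl_cons]
      rw [ih (s + PySem.Str.len x), ih (0 + PySem.Str.len x)]
      ring

/-- One-step unfolding of `tempos_alt`. -/
theorem tempos_alt_cons (w : String) (ws : List String) :
    tempos_alt (w :: ws) =
      if pvIsKw w then PySem.Str.len w :: tempos_alt ws
      else addFirst (PySem.Str.len w) (tempos_alt ws) := by
  rw [tempos_alt]
  by_cases hk : pvIsKw w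
  · have hd : (w :: ws).dropWhile (fun w => !pvIsKw w) = w :: ws := by
      simp [hk]
    split
    · next heq => rw [hd] at heq; cases heq
    · next k rest heq =>
        rw [hd] at heq
        cases heq
        simp [hk]
  · have hd : (w :: ws).dropWhile (fun w => !pvIsKw w) = ws.dropWhile (fun w => !pvIsKw w) := by
      simp [hk]
    have ht : (w :: ws).takeWhile (fun w => !pvIsKw w) = w :: ws.takeWhile (fun w => !pvIsKw w) := by
      simp [hk]
    rw [if_neg hk]
    split
    · next heq =>
        rw [hd] at heq
        conv_rhs => rw [tempos_alt]
        split
        · simp [addFirst]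
        · next k rest heq2 => rw [heq] at heq2; cases heq2
    · next k rest heq =>
        rw [hd] at heq
        conv_rhs => rw [tempos_alt]
        split
        · next heq2 => rw [heq] at heq2; cases heq2
        · next k2 rest2 heq2 =>
            rw [heq] at heq2
            cases heq2
            simp only [ht, addFirst, List.cons_append, List.foldl_cons]
            congr 1
            rw [foldl_len_shift _ (0 + PySem.Str.len w)]
            ring

theorem tempos_fold (l : List String) (res : List Int) (c : Int) :
    (l.foldl
      (fun (st : List Int × Int) palavra =>
        let cont := st.2 + PySem.Str.len palavra
        if PySem.Str.lower palavra == "perdi" || PySem.Str.lower palavra == "jogo" then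
          (st.1 ++ [cont], 0)
        else
          (st.1, cont))
      (res, c)).1 = res ++ addFirst c (tempos_alt l) := by
  induction l generalizing res c with
  | nil =>
      rw [tempos_alt]
      simp [addFirst]
  | cons w ws ih =>
      simp only [List.foldl_cons, tempos_alt_cons]
      by_cases hk : pvIsKw w
      · have hk' : (PySem.Str.lower w == "perdi" || PySem.Str.lower w == "jogo") = true := hk
        simp only [hk', if_pos, hk]
        rw [ih]
        rw [addFirst_zero]
        simp [addFirst, List.append_assoc]
      · have hk' : ¬ ((PySem.Str.lower w == "perdi" || PySem.Str.lower w == "jogo") = true) := hk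
        simp only [if_neg hk', if_neg hk]
        rw [ih, addFirst_addFirst, add_comm]

-- ===== VERDICT (by name: the statement is the Claim_ definition above) =====
theorem tempos_spec : Claim_equal_tempos := by
  intro palavras _
  show tempos palavras = tempos_alt palavras
  unfold tempos
  rw [tempos_fold, addFirst_zero]
  simp
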